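-- pv_equiv track=rewrite | github.com/Paprika69/DataWranglingProject | dataset/clean_education.py | spread_list
-- ===== SOURCE A (Python) =====
-- def spread_list(inlist):
--     outlist = []
--     curr = ""
--     for item in inlist:
--         if(item): # hit a new one, update
--             curr = item
--         outlist.append(curr)
--     return outlist
-- ===== SOURCE B (Python) =====
-- def _falsy_run_end(xs, i):
--     """index just past the run of falsy items starting at position i"""
--     while i < len(xs) and not xs[i]:
--         i += 1
--     return i
--
-- def spread_list(inlist):
--     # block-based: emit the leading falsy run as "", then for each truthy value
--     # replicate it over its whole block (itself plus the falsy run after it)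
--     j = _falsy_run_end(inlist, 0)
--     out = [""] * j
--     i = j
--     while i < len(inlist):
--         v = inlist[i]
--         j = _falsy_run_end(inlist, i + 1)
--         out += [v] * (j - i)
--         i = j
--     return out
-- ===== Notes on version B (the rewrite author's own statement) =====
-- stated objective: alternative
-- what changed: Instead of A's element-by-element pass carrying the last truthy value, B segments the list into blocks (a leading falsy run, then one block per truthy value spanning the falsy run after it) and builds the output by replicating each value over its whole block.
import Mathlib
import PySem

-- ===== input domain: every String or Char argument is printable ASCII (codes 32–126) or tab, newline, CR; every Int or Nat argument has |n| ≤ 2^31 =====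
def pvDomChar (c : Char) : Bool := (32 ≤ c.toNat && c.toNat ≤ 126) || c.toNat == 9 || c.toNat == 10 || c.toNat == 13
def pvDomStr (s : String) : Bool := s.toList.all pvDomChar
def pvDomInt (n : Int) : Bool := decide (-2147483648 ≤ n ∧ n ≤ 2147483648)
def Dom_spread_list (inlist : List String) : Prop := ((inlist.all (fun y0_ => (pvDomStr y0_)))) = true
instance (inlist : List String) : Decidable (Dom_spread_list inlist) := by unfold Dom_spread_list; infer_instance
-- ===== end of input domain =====

-- ===== PORT A =====
-- A = B proved on the whole domain; B builds the result block-by-block instead of A's element-wise carry loop.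
def spread_list (inlist : List String) : List String :=
  (inlist.foldl (fun (s : List String × String) item =>
      let curr := if item ≠ "" then item else s.2
      (s.1 ++ [curr], curr)) ([], "")).1

-- ===== PORT B =====
-- the while-loop `while i < len(xs) and not xs[i]: i += 1` (fuel = remaining indices):
-- returns the index just past the run of falsy ("") items starting at position i
def falsyRunEndGo : Nat → List String → Nat → Nat
  | 0, _, i => i
  | f + 1, xs, i =>
    if h : i < xs.length then
      if xs[i] = "" then falsyRunEndGo f xs (i + 1) else i
    else i

def falsyRunEnd (xs : List String) (i : Nat) : Nat := falsyRunEndGo (xs.length - i) xs i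

-- the outer while-loop over i: one iteration per truthy block
def fillLoopGo : Nat → List String → Nat → List String → List String
  | 0, _, _, out => out
  | f + 1, xs, i, out =>
    if h : i < xs.length then
      let v := xs[i]
      let j := falsyRunEnd xs (i + 1)
      fillLoopGo f xs j (out ++ List.replicate (j - i) v)
    else out

def spread_list_alt (inlist : List String) : List String :=
  let j := falsyRunEnd inlist 0
  fillLoopGo inlist.length inlist j (List.replicate j "")

-- ===== PRECONDITION & SPEC =====
def Spec_spread_list (inlist : List String) (out : List String) : Prop := out = spread_list_alt inlist
instance (inlist : List String) (out : List String) : Decidable (Spec_spread_list inlist out) := by unfold Spec_spread_list; infer_instance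

-- ===== CLAIM (what is proved, stated in full; the proofs are below) =====
def Claim_equal_spread_list : Prop := ∀ (inlist : List String), Dom_spread_list inlist → Spec_spread_list inlist (spread_list inlist)

-- ===== LEMMAS AND PROOFS =====

-- reference scan: what A's loop computes
def spreadScan (acc : String) : List String → List String
  | [] => []
  | x :: xs =>
    let n := if x ≠ "" then x else acc
    n :: spreadScan n xs

theorem spread_foldl_scan (l : List String) (out : List String) (curr : String) :
    (l.foldl (fun (s : List String × String) item =>
        let c := if item ≠ "" then item else s.2
        (s.1 ++ [c], c)) (out, curr)).1 = out ++ spreadScan curr l := by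
  induction l generalizing out curr with
  | nil => simp [spreadScan]
  | cons x xs ih =>
    show (List.foldl _ (out ++ [if x ≠ "" then x else curr], if x ≠ "" then x else curr) xs).1 = _
    rw [ih]
    simp [spreadScan]

-- list-level reference versions of B's index loops
def falsyPrefixLen : List String → Nat
  | [] => 0
  | x :: xs => if x = "" then falsyPrefixLen xs + 1 else 0

def fillBlocks : List String → List String
  | [] => []
  | v :: rest =>
    let k := 1 + falsyPrefixLen rest
    List.replicate k v ++ fillBlocks ((v :: rest).drop k)
termination_by l => l.length
decreasing_by simp

theorem falsyPrefixLen_le (l : List String) : falsyPrefixLen l ≤ l.length := by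
  induction l with
  | nil => simp [falsyPrefixLen]
  | cons x xs ih =>
    by_cases h : x = "" <;> simp [falsyPrefixLen, h]
    omega

theorem drop_falsy_head (l : List String) :
    l.drop (falsyPrefixLen l) = [] ∨
    ∃ v rest, l.drop (falsyPrefixLen l) = v :: rest ∧ v ≠ "" := by
  induction l with
  | nil => left; simp
  | cons x xs ih =>
    by_cases h : x = ""
    · simpa [falsyPrefixLen, h] using ih
    · right; exact ⟨x, xs, by simp [falsyPrefixLen, h], h⟩

theorem falsyRunEndGo_spec : ∀ (f : Nat) (xs : List String) (i : Nat),
    xs.length - i ≤ f → falsyRunEndGo f xs i = i + falsyPrefixLen (xs.drop i) := by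
  intro f
  induction f with
  | zero =>
    intro xs i hf
    have hnil : xs.drop i = [] := List.drop_eq_nil_of_le (by omega)
    simp [falsyRunEndGo, hnil, falsyPrefixLen]
  | succ f ih =>
    intro xs i hf
    by_cases h : i < xs.length
    · have hd : xs.drop i = xs[i] :: xs.drop (i + 1) := List.drop_eq_getElem_cons h
      by_cases hx : xs[i] = ""
      · simp only [falsyRunEndGo, h, dif_pos, hx, if_pos]
        rw [ih xs (i + 1) (by omega), hd]
        simp [falsyPrefixLen, hx]
        omega
      · simp only [falsyRunEndGo, h, dif_pos, hx, if_neg, not_false_iff]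
        rw [hd]
        simp [falsyPrefixLen, hx]
    · have hnil : xs.drop i = [] := List.drop_eq_nil_of_le (by omega)
      simp [falsyRunEndGo, h, hnil, falsyPrefixLen]

theorem falsyRunEnd_spec (xs : List String) (i : Nat) :
    falsyRunEnd xs i = i + falsyPrefixLen (xs.drop i) :=
  falsyRunEndGo_spec (xs.length - i) xs i (le_refl _)

theorem falsyRunEnd_ge (xs : List String) (i : Nat) : i ≤ falsyRunEnd xs i := by
  rw [falsyRunEnd_spec]; omega

theorem fillLoopGo_eq_fillBlocks : ∀ (f : Nat) (xs : List String) (i : Nat) (out : List String),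
    xs.length - i ≤ f → fillLoopGo f xs i out = out ++ fillBlocks (xs.drop i) := by
  intro f
  induction f with
  | zero =>
    intro xs i out hf
    have hnil : xs.drop i = [] := List.drop_eq_nil_of_le (by omega)
    simp [fillLoopGo, hnil, fillBlocks]
  | succ f ih =>
    intro xs i out hf
    by_cases h : i < xs.length
    · simp only [fillLoopGo, h, dif_pos]
      have hge := falsyRunEnd_ge xs (i + 1)
      rw [ih xs (falsyRunEnd xs (i + 1)) _ (by omega)]
      have hd : xs.drop i = xs[i] :: xs.drop (i + 1) := List.drop_eq_getElem_cons h
      rw [hd, fillBlocks]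
      have hj : falsyRunEnd xs (i + 1) = i + 1 + falsyPrefixLen (xs.drop (i + 1)) :=
        falsyRunEnd_spec xs (i + 1)
      have hk : falsyRunEnd xs (i + 1) - i = 1 + falsyPrefixLen (xs.drop (i + 1)) := by omega
      rw [hk]
      have hdrop : (xs[i] :: xs.drop (i + 1)).drop (1 + falsyPrefixLen (xs.drop (i + 1)))
          = xs.drop (falsyRunEnd xs (i + 1)) := by
        rw [hj]
        simp [Nat.add_comm 1 (falsyPrefixLen (xs.drop (i + 1))), List.drop_drop]
        congr 1
        omega
      rw [hdrop, List.append_assoc]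
    · simp only [fillLoopGo, h, dif_neg, not_false_iff]
      have hnil : xs.drop i = [] := List.drop_eq_nil_of_le (by omega)
      simp [hnil, fillBlocks]

theorem scan_falsy_prefix (l : List String) (c : String) :
    spreadScan c l = List.replicate (falsyPrefixLen l) c ++ spreadScan c (l.drop (falsyPrefixLen l)) := by
  induction l generalizing c with
  | nil => simp [falsyPrefixLen, spreadScan]
  | cons x xs ih =>
    by_cases h : x = ""
    · simp [spreadScan, falsyPrefixLen, h, List.replicate_succ]
      exact ih c
    · simp [falsyPrefixLen, h]

theorem fillBlocks_eq_scan : ∀ (n : ℕ) (l : List String) (c : String), l.length ≤ n →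
    (l = [] ∨ ∃ v rest, l = v :: rest ∧ v ≠ "") → fillBlocks l = spreadScan c l := by
  intro n
  induction n with
  | zero =>
    intro l c hlen h
    interval_cases h' : l.length
    · simp at h'; subst h'; simp [fillBlocks, spreadScan]
  | succ n ih =>
    intro l c hlen h
    rcases h with rfl | ⟨v, rest, rfl, hv⟩
    · simp [fillBlocks, spreadScan]
    · have hk := falsyPrefixLen_le rest
      rw [fillBlocks]
      show List.replicate (1 + falsyPrefixLen rest) v ++
          fillBlocks ((v :: rest).drop (1 + falsyPrefixLen rest)) = _
      have hdrop : (v :: rest).drop (1 + falsyPrefixLen rest) = rest.drop (falsyPrefixLen rest) := by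
        simp [List.drop_succ_cons, Nat.add_comm]
      rw [hdrop]
      have htail : fillBlocks (rest.drop (falsyPrefixLen rest)) = spreadScan v (rest.drop (falsyPrefixLen rest)) := by
        apply ih _ v
        · have := List.length_drop (l := rest) (i := falsyPrefixLen rest)
          simp at hlen ⊢; omega
        · rcases drop_falsy_head rest with h0 | ⟨w, r, hw, hwne⟩
          · left; exact h0
          · right; exact ⟨w, r, hw, hwne⟩
      rw [htail]
      simp [spreadScan, hv, List.replicate_succ, Nat.add_comm 1 (falsyPrefixLen rest)]
      exact (scan_falsy_prefix rest v).symm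

-- ===== VERDICT (by name: the statement is the Claim_ definition above) =====
theorem spread_list_spec : Claim_equal_spread_list := by
  intro inlist _
  unfold Spec_spread_list spread_list spread_list_alt
  have hA := spread_foldl_scan inlist [] ""
  simp only [List.nil_append] at hA
  rw [hA]
  have h0 : falsyRunEnd inlist 0 = falsyPrefixLen inlist := by
    simpa using falsyRunEnd_spec inlist 0
  rw [h0, fillLoopGo_eq_fillBlocks inlist.length inlist _ _ (by omega),
      scan_falsy_prefix inlist ""]
  congr 1
  exact (fillBlocks_eq_scan inlist.length _ "" (by simp) (drop_falsy_head inlist)).symm
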